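-- pv_equiv track=rewrite | github.com/Daniele-Cangi/PAW--Phishing-Attribution-Workbench-- | advanced/operational_pattern_predictor.py | likely_new_providers
-- ===== SOURCE A (Python) =====
-- from typing import Dict, List, Any, Tuple
--
-- def likely_new_providers(rows: List[Dict[str, Any]]) -> List[str]:
--     orgs = {(r.get('org') or r.get('organization') or '').lower() for r in rows}
--     hints = []
--     if any('cloudflare' in o for o in orgs):
--         hints += ['AWS', 'Google Cloud']
--     if any('amazon' in o or 'aws' in o for o in orgs):
--         hints += ['Cloudflare', 'Microsoft']
--     if any('microsoft' in o for o in orgs):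
--         hints += ['Cloudflare', 'AWS']
--     return sorted(set(hints)) or ['Cloud/Hosting (generic)']
-- ===== SOURCE B (Python) =====
-- def likely_new_providers(rows):
--     cf = amz = ms = False
--     for r in rows:
--         o = (r.get('org') or r.get('organization') or '').lower()
--         cf = cf or 'cloudflare' in o
--         amz = amz or 'amazon' in o or 'aws' in o
--         ms = ms or 'microsoft' in o
--     hints = ((['AWS'] if cf or ms else [])
--              + (['Cloudflare'] if amz or ms else [])
--              + (['Google Cloud'] if cf else [])
--              + (['Microsoft'] if amz else []))
--     return hints or ['Cloud/Hosting (generic)']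
-- ===== Notes on version B (the rewrite author's own statement) =====
-- stated objective: simpler
-- what changed: Replaced A's set comprehension plus three separate any-scans and a final sorted(set(...)) with a single flag-accumulating pass over rows that builds the hint list directly in sorted, deduplicated order, so no set and no sort are needed.
import Mathlib
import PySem

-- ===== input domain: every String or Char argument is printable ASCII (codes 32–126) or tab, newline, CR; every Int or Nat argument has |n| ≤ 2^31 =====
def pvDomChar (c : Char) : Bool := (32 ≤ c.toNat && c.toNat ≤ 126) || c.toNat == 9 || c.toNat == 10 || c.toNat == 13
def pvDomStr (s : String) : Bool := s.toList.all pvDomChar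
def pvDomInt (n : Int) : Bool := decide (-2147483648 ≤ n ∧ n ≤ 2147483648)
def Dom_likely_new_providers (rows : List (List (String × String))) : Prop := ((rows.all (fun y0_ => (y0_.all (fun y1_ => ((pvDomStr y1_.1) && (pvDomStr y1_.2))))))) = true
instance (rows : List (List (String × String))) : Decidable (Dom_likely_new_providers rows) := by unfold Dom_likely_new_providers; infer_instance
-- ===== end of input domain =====

-- B replaces A's dedup-set-plus-three-scans with one flag-accumulating pass over rows and
-- builds the hint list directly in sorted deduplicated order (objective: simpler; no sort, no sets).

-- shared helper: Python's `(r.get('org') or r.get('organization') or '').lower()`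
-- (an `or` chain over strings: first non-empty present value, else '')
def pvOrStr (o : Option String) (d : String) : String :=
  match o with
  | some s => if s = "" then d else s
  | none => d

def pvOrgOf (r : List (String × String)) : String :=
  PySem.Str.lower (pvOrStr (PySem.Dict.get? (PySem.Dict.mk r) "org") (pvOrStr (PySem.Dict.get? (PySem.Dict.mk r) "organization") ""))

-- ===== PORT A =====
def likely_new_providers (rows : List (List (String × String))) : List String :=
  let orgs : PySem.Set String := PySem.Set.ofList (rows.map pvOrgOf)
  let hints : List String := []
  let hints := if orgs.any (fun o => PySem.Str.isIn "cloudflare" o) then hints ++ ["AWS", "Google Cloud"] else hints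
  let hints := if orgs.any (fun o => PySem.Str.isIn "amazon" o || PySem.Str.isIn "aws" o) then hints ++ ["Cloudflare", "Microsoft"] else hints
  let hints := if orgs.any (fun o => PySem.Str.isIn "microsoft" o) then hints ++ ["Cloudflare", "AWS"] else hints
  let res := PySem.List.sorted (PySem.Set.ofList hints) (fun x => x) false
  if res = [] then ["Cloud/Hosting (generic)"] else res

-- ===== PORT B =====
def likely_new_providers_alt (rows : List (List (String × String))) : List String :=
  let fl := rows.foldl
    (fun (fl : Bool × Bool × Bool) r =>
      let o := pvOrgOf r
      (fl.1 || PySem.Str.isIn "cloudflare" o,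
       fl.2.1 || PySem.Str.isIn "amazon" o || PySem.Str.isIn "aws" o,
       fl.2.2 || PySem.Str.isIn "microsoft" o))
    (false, false, false)
  let hints :=
    (if fl.1 || fl.2.2 then ["AWS"] else []) ++
    (if fl.2.1 || fl.2.2 then ["Cloudflare"] else []) ++
    (if fl.1 then ["Google Cloud"] else []) ++
    (if fl.2.1 then ["Microsoft"] else [])
  if hints = [] then ["Cloud/Hosting (generic)"] else hints

-- ===== PRECONDITION & SPEC =====
def Spec_likely_new_providers (rows : List (List (String × String))) (out : List String) : Prop := out = likely_new_providers_alt rows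
instance (rows : List (List (String × String))) (out : List String) : Decidable (Spec_likely_new_providers rows out) := by unfold Spec_likely_new_providers; infer_instance

-- ===== CLAIM (what is proved, stated in full; the proofs are below) =====
def Claim_equal_likely_new_providers : Prop := ∀ (rows : List (List (String × String))), Dom_likely_new_providers rows → Spec_likely_new_providers rows (likely_new_providers rows)

-- ===== LEMMAS AND PROOFS =====

-- `any` over set(xs) agrees with `any` over xs (membership is preserved by dedup)
theorem pv_set_any {α : Type} [BEq α] [LawfulBEq α] (xs : List α) (p : α → Bool) :
    (PySem.Set.ofList xs).any p = xs.any p := by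
  apply Bool.eq_iff_iff.mpr
  simp only [List.any_eq_true]
  constructor
  · rintro ⟨x, hx, hp⟩; exact ⟨x, (PySem.Set.mem_ofList _ _).mp hx, hp⟩
  · rintro ⟨x, hx, hp⟩; exact ⟨x, (PySem.Set.mem_ofList _ _).mpr hx, hp⟩

-- B's single pass accumulates exactly the three `any`s
theorem pv_fold_flags (rows : List (List (String × String))) :
    ∀ (a b c : Bool),
      rows.foldl
        (fun (fl : Bool × Bool × Bool) r =>
          let o := pvOrgOf r
          (fl.1 || PySem.Str.isIn "cloudflare" o,
           fl.2.1 || PySem.Str.isIn "amazon" o || PySem.Str.isIn "aws" o,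
           fl.2.2 || PySem.Str.isIn "microsoft" o))
        (a, b, c)
      = (a || rows.any (fun r => PySem.Str.isIn "cloudflare" (pvOrgOf r)),
         b || rows.any (fun r => PySem.Str.isIn "amazon" (pvOrgOf r) || PySem.Str.isIn "aws" (pvOrgOf r)),
         c || rows.any (fun r => PySem.Str.isIn "microsoft" (pvOrgOf r))) := by
  induction rows with
  | nil => intro a b c; simp
  | cons r t ih =>
      intro a b c
      simp only [List.foldl_cons, List.any_cons, ih]
      simp [Bool.or_assoc]


-- the seven non-empty hint lists A can build, with their sorted deduplications
theorem pv_c100 : PySem.List.sorted (PySem.Set.ofList (["AWS", "Google Cloud"] : List String)) (fun x => x) false = ["AWS", "Google Cloud"] := by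
  apply PySem.List.sorted_id_eq_of_perm_of_pairwise
  · decide
  · simp [List.pairwise_cons]; decide

theorem pv_c010 : PySem.List.sorted (PySem.Set.ofList (["Cloudflare", "Microsoft"] : List String)) (fun x => x) false = ["Cloudflare", "Microsoft"] := by
  apply PySem.List.sorted_id_eq_of_perm_of_pairwise
  · decide
  · simp [List.pairwise_cons]; decide

theorem pv_c001 : PySem.List.sorted (PySem.Set.ofList (["Cloudflare", "AWS"] : List String)) (fun x => x) false = ["AWS", "Cloudflare"] := by
  apply PySem.List.sorted_id_eq_of_perm_of_pairwise
  · decide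
  · simp [List.pairwise_cons]; decide

theorem pv_c110 : PySem.List.sorted (PySem.Set.ofList (["AWS", "Google Cloud", "Cloudflare", "Microsoft"] : List String)) (fun x => x) false = ["AWS", "Cloudflare", "Google Cloud", "Microsoft"] := by
  apply PySem.List.sorted_id_eq_of_perm_of_pairwise
  · decide
  · simp [List.pairwise_cons]; decide

theorem pv_c101 : PySem.List.sorted (PySem.Set.ofList (["AWS", "Google Cloud", "Cloudflare", "AWS"] : List String)) (fun x => x) false = ["AWS", "Cloudflare", "Google Cloud"] := by
  apply PySem.List.sorted_id_eq_of_perm_of_pairwise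
  · decide
  · simp [List.pairwise_cons]; decide

theorem pv_c011 : PySem.List.sorted (PySem.Set.ofList (["Cloudflare", "Microsoft", "Cloudflare", "AWS"] : List String)) (fun x => x) false = ["AWS", "Cloudflare", "Microsoft"] := by
  apply PySem.List.sorted_id_eq_of_perm_of_pairwise
  · decide
  · simp [List.pairwise_cons]; decide

theorem pv_c111 : PySem.List.sorted (PySem.Set.ofList (["AWS", "Google Cloud", "Cloudflare", "Microsoft", "Cloudflare", "AWS"] : List String)) (fun x => x) false = ["AWS", "Cloudflare", "Google Cloud", "Microsoft"] := by
  apply PySem.List.sorted_id_eq_of_perm_of_pairwise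
  · decide
  · simp [List.pairwise_cons]; decide

theorem likely_new_providers_eq_alt (rows : List (List (String × String))) :
    likely_new_providers rows = likely_new_providers_alt rows := by
  unfold likely_new_providers likely_new_providers_alt
  rw [pv_fold_flags]
  simp only [pv_set_any, List.any_map, Function.comp_def, Bool.false_or]
  generalize (rows.any (fun r => PySem.Str.isIn "cloudflare" (pvOrgOf r))) = cf
  generalize (rows.any (fun r => PySem.Str.isIn "amazon" (pvOrgOf r) || PySem.Str.isIn "aws" (pvOrgOf r))) = amz
  generalize (rows.any (fun r => PySem.Str.isIn "microsoft" (pvOrgOf r))) = ms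
  cases cf <;> cases amz <;> cases ms <;>
    simp [PySem.List.sorted_eq_nil_iff, pv_c001, pv_c010, pv_c011, pv_c100, pv_c101, pv_c110, pv_c111]

-- ===== VERDICT (by name: the statement is the Claim_ definition above) =====
theorem likely_new_providers_spec : Claim_equal_likely_new_providers := by
  intro rows _
  exact likely_new_providers_eq_alt rows
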